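-- pv_equiv track=rewrite | github.com/Luloide/IP | Practicas/Soluciones/practica7.py | peso_pino
-- ===== SOURCE A (Python) =====
-- def peso_pino(a: int) -> int:
--     x = a
--     peso = 0
--     while x != 0:
--         if x > 3 :
--             peso += 200
--             x = x-1
--         elif x<=3:
--             peso += 300
--             x = x-1
--     return peso
-- ===== SOURCE B (Python) =====
-- def peso_pino(a: int) -> int:
--     # Closed form: a steps, those above 3 weigh 200, the rest 300.
--     if a > 3:
--         return (a - 3) * 200 + 900
--     return a * 300
-- ===== Notes on version B (the rewrite author's own statement) =====
-- stated objective: faster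
-- what changed: Replaced the decrementing while-loop with a closed-form arithmetic formula ((a-3)*200+900 for a>3, else a*300).
import Mathlib
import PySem

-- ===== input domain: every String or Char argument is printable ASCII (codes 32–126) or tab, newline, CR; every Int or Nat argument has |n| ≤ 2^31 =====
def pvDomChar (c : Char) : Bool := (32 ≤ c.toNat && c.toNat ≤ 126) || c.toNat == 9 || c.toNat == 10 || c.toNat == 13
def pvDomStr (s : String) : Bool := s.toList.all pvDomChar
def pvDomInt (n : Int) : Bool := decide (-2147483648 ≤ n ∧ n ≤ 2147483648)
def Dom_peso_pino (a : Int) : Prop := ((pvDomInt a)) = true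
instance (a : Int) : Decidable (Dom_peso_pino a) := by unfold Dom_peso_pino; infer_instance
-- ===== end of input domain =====

-- B replaces A's decrementing loop with a closed-form formula (objective: faster, O(1) vs O(a)).

-- ===== PORT A =====
-- while x != 0: fuel = a.toNat iterations always suffice when 0 ≤ a (each step decrements x by 1)
def pesoLoopA (x peso : Int) : Nat → Int
  | 0 => peso
  | fuel + 1 =>
    if x ≠ 0 then
      if x > 3 then pesoLoopA (x - 1) (peso + 200) fuel
      else if x ≤ 3 then pesoLoopA (x - 1) (peso + 300) fuel
      else peso
    else peso

def peso_pino (a : Int) : Int := pesoLoopA a 0 a.toNat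

-- ===== PORT B =====
def peso_pino_alt (a : Int) : Int :=
  if a > 3 then (a - 3) * 200 + 900 else a * 300

-- ===== PRECONDITION & SPEC =====
-- Pre_ excludes a < 0, on which Python A loops forever (never returns).
def Pre_peso_pino (a : Int) : Prop := 0 ≤ a
instance (a : Int) : Decidable (Pre_peso_pino a) := by unfold Pre_peso_pino; infer_instance
def pvWitness_peso_pino : Int := (5)
def Spec_peso_pino (a : Int) (out : Int) : Prop := out = peso_pino_alt a
instance (a : Int) (out : Int) : Decidable (Spec_peso_pino a out) := by unfold Spec_peso_pino; infer_instance

-- ===== CLAIM (what is proved, stated in full; the proofs are below) =====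
def Claim_equal_peso_pino : Prop := ∀ (a : Int), Dom_peso_pino a → Pre_peso_pino a → Spec_peso_pino a (peso_pino a)

-- ===== LEMMAS AND PROOFS =====
lemma pesoLoopA_closed (n : Nat) : ∀ (peso : Int),
    pesoLoopA (n : Int) peso n =
      peso + (if (n : Int) > 3 then ((n : Int) - 3) * 200 + 900 else (n : Int) * 300) := by
  induction n with
  | zero => intro peso; simp [pesoLoopA]
  | succ k ih =>
    intro peso
    have hx : ((k + 1 : Nat) : Int) ≠ 0 := by push_cast; omega
    by_cases h4 : ((k + 1 : Nat) : Int) > 3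
    · have hk : ((k + 1 : Nat) : Int) - 1 = (k : Int) := by push_cast; ring
      simp only [pesoLoopA, h4, ite_true]
      rw [hk, ih]
      have hk3 : (k : Int) ≥ 3 := by push_cast at h4 ⊢; omega
      by_cases hkk : (k : Int) > 3 <;> simp [hkk] <;> push_cast at * <;> omega
    · have h3 : ((k + 1 : Nat) : Int) ≤ 3 := by omega
      have hk : ((k + 1 : Nat) : Int) - 1 = (k : Int) := by push_cast; ring
      simp only [pesoLoopA, h4, ite_false, h3, ite_true]
      rw [hk, ih]
      have hkk : ¬ (k : Int) > 3 := by push_cast at h3 ⊢; omega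
      simp only [hkk, ite_false]
      split_ifs <;> push_cast at * <;> omega

-- ===== VERDICT (by name: the statement is the Claim_ definition above) =====
theorem peso_pino_spec : Claim_equal_peso_pino := by
  intro a _ hpre
  have ha : ((a.toNat : Nat) : Int) = a := Int.toNat_of_nonneg hpre
  have h := pesoLoopA_closed a.toNat 0
  rw [ha] at h
  unfold Spec_peso_pino peso_pino peso_pino_alt
  rw [h]
  simp
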